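-- pv_equiv track=rewrite | github.com/ninosauvageot/Python | Python/tp_mr101_struct/TP3/tp3.py | indexOfSorted
-- ===== SOURCE A (Python) =====
-- def indexOfSorted(lst,val)->tuple:
--     res = -1
--     compteur=0
--     for i in range(len(lst)):
--         if lst[i]<=val:
--             if lst[i] == val and res == -1:
--                 res = i
--             elif res==-1:
--                 compteur += 1
--
--     return res,compteur
-- ===== SOURCE B (Python) =====
-- def indexOfSorted(lst, val) -> tuple:
--     # two passes: find the first index of val, then count strictly smaller
--     # elements before that point (whole list if absent)
--     res = -1
--     for i, x in enumerate(lst):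
--         if x == val:
--             res = i
--             break
--     end = res if res != -1 else len(lst)
--     compteur = 0
--     for i in range(end):
--         if lst[i] < val:
--             compteur += 1
--     return res, compteur
-- ===== Notes on version B (the rewrite author's own statement) =====
-- stated objective: simpler
-- what changed: A's single pass with interleaved res/compteur conditions is replaced by two plain passes: find the first index of val (with early break), then count elements smaller than val before that point.
import Mathlib
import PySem

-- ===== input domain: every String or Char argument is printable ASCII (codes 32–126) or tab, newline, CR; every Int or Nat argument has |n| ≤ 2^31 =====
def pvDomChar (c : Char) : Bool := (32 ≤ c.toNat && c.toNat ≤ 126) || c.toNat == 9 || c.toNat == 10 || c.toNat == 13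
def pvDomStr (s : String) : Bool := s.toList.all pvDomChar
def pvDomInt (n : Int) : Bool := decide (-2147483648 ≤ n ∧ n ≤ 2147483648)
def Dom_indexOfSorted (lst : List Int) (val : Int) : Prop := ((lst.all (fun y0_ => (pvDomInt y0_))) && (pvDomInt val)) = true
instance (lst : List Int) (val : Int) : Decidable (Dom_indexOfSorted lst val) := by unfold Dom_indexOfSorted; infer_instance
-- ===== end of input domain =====

-- B replaces A's single pass with three interleaved conditions by two simple passes
-- (find the first index of val, then count smaller elements before that point);
-- same return value everywhere, objective: simpler.

-- ===== PORT A =====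
-- A's loop body, on state (i, res, compteur); branches in A's order
def aStep (val : Int) (s : Nat × Int × Int) (x : Int) : Nat × Int × Int :=
  if x ≤ val then
    if x = val ∧ s.2.1 = -1 then (s.1 + 1, (s.1 : Int), s.2.2)
    else if s.2.1 = -1 then (s.1 + 1, s.2.1, s.2.2 + 1)
    else (s.1 + 1, s.2.1, s.2.2)
  else (s.1 + 1, s.2.1, s.2.2)

def indexOfSorted (lst : List Int) (val : Int) : List Int :=
  let st := lst.foldl (aStep val) (0, -1, 0)
  [st.2.1, st.2.2]

-- ===== PORT B =====
-- first loop of Source B: first index of val, -1 if absent (break = stop recursing)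
def bFind (val : Int) : List Int → Nat → Int
  | [], _ => -1
  | x :: xs, i => if x = val then (i : Int) else bFind val xs (i + 1)

-- second loop's body
def bStep (val : Int) (c : Int) (x : Int) : Int := if x < val then c + 1 else c

def indexOfSorted_alt (lst : List Int) (val : Int) : List Int :=
  let res := bFind val lst 0
  -- end = res if res != -1 else len(lst); res ≥ 0 when ≠ -1, so toNat is exact
  let e : Nat := if res = -1 then lst.length else res.toNat
  let compteur := (lst.take e).foldl (bStep val) (0 : Int)
  [res, compteur]

-- ===== PRECONDITION & SPEC =====
def Spec_indexOfSorted (lst : List Int) (val : Int) (out : List Int) : Prop := out = indexOfSorted_alt lst val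
instance (lst : List Int) (val : Int) (out : List Int) : Decidable (Spec_indexOfSorted lst val out) := by unfold Spec_indexOfSorted; infer_instance

-- ===== CLAIM (what is proved, stated in full; the proofs are below) =====
def Claim_equal_indexOfSorted : Prop := ∀ (lst : List Int) (val : Int), Dom_indexOfSorted lst val → Spec_indexOfSorted lst val (indexOfSorted lst val)

-- ===== LEMMAS AND PROOFS =====

-- reference function both ports are reduced to
def gRef (val : Int) : List Int → Nat → Int → Int × Int
  | [], _, c => (-1, c)
  | x :: xs, i, c =>
    if x = val then ((i : Int), c)
    else if x < val then gRef val xs (i + 1) (c + 1)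
    else gRef val xs (i + 1) c

-- once res is set, A's loop only advances the index
theorem aStep_frozen (val x : Int) (i : Nat) (r c : Int) (h : r ≠ -1) :
    aStep val (i, r, c) x = (i + 1, r, c) := by
  unfold aStep
  by_cases h1 : x ≤ val
  · rw [if_pos h1, if_neg (fun hh => h hh.2), if_neg h]
  · rw [if_neg h1]

theorem A_frozen (val : Int) : ∀ (xs : List Int) (i : Nat) (r c : Int), r ≠ -1 →
    (xs.foldl (aStep val) (i, r, c)).2 = (r, c) := by
  intro xs
  induction xs with
  | nil => intro i r c _; rfl
  | cons x xs ih =>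
    intro i r c h
    rw [List.foldl_cons, aStep_frozen val x i r c h]
    exact ih _ _ _ h

-- A's fold while res = -1 computes gRef
theorem A_g (val : Int) : ∀ (xs : List Int) (i : Nat) (c : Int),
    (xs.foldl (aStep val) (i, -1, c)).2 = gRef val xs i c := by
  intro xs
  induction xs with
  | nil => intro i c; simp [gRef]
  | cons x xs ih =>
    intro i c
    rw [List.foldl_cons]
    by_cases he : x = val
    · have hstep : aStep val (i, -1, c) x = (i + 1, (i : Int), c) := by
        unfold aStep
        rw [if_pos (le_of_eq he), if_pos ⟨he, rfl⟩]
      have hi : (i : Int) ≠ -1 := by omega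
      rw [hstep, A_frozen val xs (i + 1) (i : Int) c hi]
      simp [gRef, he]
    · by_cases hlt : x < val
      · have hstep : aStep val (i, -1, c) x = (i + 1, -1, c + 1) := by
          unfold aStep
          rw [if_pos (le_of_lt hlt), if_neg (fun hh => he hh.1), if_pos rfl]
        rw [hstep, ih]
        simp [gRef, he, hlt]
      · have hstep : aStep val (i, -1, c) x = (i + 1, -1, c) := by
          unfold aStep
          rw [if_neg (by omega : ¬ x ≤ val)]
        rw [hstep, ih]
        simp [gRef, he, hlt]

-- bFind returns -1 or an index ≥ its starting offset
theorem bFind_ge (val : Int) : ∀ (xs : List Int) (i : Nat),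
    bFind val xs i = -1 ∨ ((i : Int)) ≤ bFind val xs i := by
  intro xs
  induction xs with
  | nil => intro i; left; rfl
  | cons x xs ih =>
    intro i
    by_cases he : x = val
    · right; simp [bFind, he]
    · rcases ih (i + 1) with h | h
      · left; simp [bFind, he, h]
      · right
        simp only [bFind, he, if_false]
        have : (i : Int) ≤ ((i + 1 : Nat) : Int) := by push_cast; omega
        exact le_trans this h

-- B's two passes compose to gRef
theorem B_g (val : Int) : ∀ (xs : List Int) (i : Nat) (c : Int),
    (bFind val xs i,
      (xs.take (if bFind val xs i = -1 then xs.length else (bFind val xs i - (i : Int)).toNat)).foldl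
        (bStep val) c) = gRef val xs i c := by
  intro xs
  induction xs with
  | nil => intro i c; simp [bFind, gRef]
  | cons x xs ih =>
    intro i c
    by_cases he : x = val
    · simp [bFind, he, gRef]
    · rw [show bFind val (x :: xs) i = bFind val xs (i + 1) from by simp [bFind, he]]
      rcases bFind_ge val xs (i + 1) with hnone | hge
      · rw [hnone, if_pos rfl, List.length_cons, List.take_succ_cons, List.take_length,
          List.foldl_cons]
        have hih := ih (i + 1) (bStep val c x)
        rw [hnone, if_pos rfl, List.take_length] at hih
        by_cases hlt : x < val
        · simp only [bStep, hlt, if_true] at hih ⊢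
          rw [hih]
          simp [gRef, he, hlt]
        · simp only [bStep, hlt, if_false] at hih ⊢
          rw [hih]
          simp [gRef, he, hlt]
      · have hne : bFind val xs (i + 1) ≠ -1 := by omega
        have htn : (bFind val xs (i + 1) - (i : Int)).toNat
            = (bFind val xs (i + 1) - ((i + 1 : Nat) : Int)).toNat + 1 := by
          push_cast at hge ⊢; omega
        rw [if_neg hne, htn, List.take_succ_cons, List.foldl_cons]
        have hih := ih (i + 1) (bStep val c x)
        rw [if_neg hne] at hih
        by_cases hlt : x < val
        · simp only [bStep, hlt, if_true] at hih ⊢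
          rw [hih]
          simp [gRef, he, hlt]
        · simp only [bStep, hlt, if_false] at hih ⊢
          rw [hih]
          simp [gRef, he, hlt]

-- ===== VERDICT (by name: the statement is the Claim_ definition above) =====
theorem indexOfSorted_spec : Claim_equal_indexOfSorted := by
  intro lst val _
  unfold Spec_indexOfSorted indexOfSorted indexOfSorted_alt
  have hA := A_g val lst 0 0
  have hB := B_g val lst 0 0
  simp only [Nat.cast_zero, sub_zero] at hB
  have hA1 : ((lst.foldl (aStep val) (0, -1, 0)).2.1) = (gRef val lst 0 0).1 := by rw [hA]
  have hA2 : ((lst.foldl (aStep val) (0, -1, 0)).2.2) = (gRef val lst 0 0).2 := by rw [hA]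
  have e1 : bFind val lst 0 = (gRef val lst 0 0).1 := by rw [← hB]
  have e2 : ((lst.take (if bFind val lst 0 = -1 then lst.length else (bFind val lst 0).toNat)).foldl
      (bStep val) (0 : Int)) = (gRef val lst 0 0).2 := by rw [← hB]
  simp only [hA1, hA2]
  rw [e2, e1]
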